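-- pv_equiv track=rewrite | github.com/spencerseale/motif-mark | fxns.py | combo_picker
-- ===== SOURCE A (Python) =====
-- import itertools as it
--
-- def combo_picker(mo, dict):
--     new_list = []
--     for nt in mo:
--         nested_list = []
--         if nt in dict:
--             nested_list.append(dict[nt])
--             new_list.append(nested_list)
--         else:
--             nested_list.append(list(nt))
--             new_list.append(nested_list)
--     x = list(it.product(*new_list))
--     final_list = []
--     for i in x[0]:
--         final_list.append(i)
--     poss_combo = list(it.product(*final_list))
--     return ["".join(i) for i in poss_combo]
-- ===== SOURCE B (Python) =====
-- def combo_picker(mo, dict):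
--     acc = [""]
--     for nt in mo:
--         bases = dict[nt] if nt in dict else [nt]
--         acc = [p + b for p in acc for b in bases]
--     return acc
-- ===== Notes on version B (the rewrite author's own statement) =====
-- stated objective: simpler
-- what changed: Replaces the two itertools.product passes and the intermediate nested-list/tuple plumbing with a single left fold that grows the list of partial strings one motif position at a time.
import Mathlib
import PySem

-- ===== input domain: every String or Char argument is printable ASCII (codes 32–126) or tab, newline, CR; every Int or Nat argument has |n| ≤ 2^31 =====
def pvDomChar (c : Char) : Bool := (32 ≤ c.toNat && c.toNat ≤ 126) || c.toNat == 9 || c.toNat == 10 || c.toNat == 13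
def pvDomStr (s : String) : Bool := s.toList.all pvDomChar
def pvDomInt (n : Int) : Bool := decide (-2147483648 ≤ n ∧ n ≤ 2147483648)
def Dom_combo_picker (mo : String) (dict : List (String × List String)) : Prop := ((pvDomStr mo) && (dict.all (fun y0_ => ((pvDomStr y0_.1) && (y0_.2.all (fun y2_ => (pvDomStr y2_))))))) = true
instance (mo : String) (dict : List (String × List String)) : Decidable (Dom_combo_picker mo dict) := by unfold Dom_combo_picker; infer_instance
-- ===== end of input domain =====

-- B replaces the two itertools.product passes with a single fold growing partial strings;
-- objective: simpler (same asymptotic cost).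

-- ===== PORT A =====
-- itertools.product over a list of pools, last position varying fastest (exact CPython order)
def pvProduct {α : Type} : List (List α) → List (List α)
  | [] => [[]]
  | l :: ls => l.flatMap (fun x => (pvProduct ls).map (fun t => x :: t))

def combo_picker (mo : String) (dict : List (String × List String)) : List String :=
  -- for nt in mo: append [dict[nt]] if nt in dict else [list(nt)]
  let new_list : List (List (List String)) :=
    mo.toList.foldl (fun acc nt =>
      match PySem.Dict.get? (PySem.Dict.mk dict) (String.singleton nt) with
      | some v => acc ++ [[v]]
      | none => acc ++ [[[String.singleton nt]]]) []
  let x := pvProduct new_list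
  -- x[0]: every pool in new_list is a singleton, so x is never empty; Python's x[0] never raises
  let final_list := (PySem.List.pyGet? x 0).getD []
  let poss_combo := pvProduct final_list
  poss_combo.map (fun i => PySem.Str.join "" i)

-- ===== PORT B =====
def combo_picker_alt (mo : String) (dict : List (String × List String)) : List String :=
  mo.toList.foldl (fun acc nt =>
    let bases :=
      match PySem.Dict.get? (PySem.Dict.mk dict) (String.singleton nt) with
      | some v => v
      | none => [String.singleton nt]
    acc.flatMap (fun p => bases.map (fun b => p ++ b))) [""]

-- ===== PRECONDITION & SPEC =====
def Spec_combo_picker (mo : String) (dict : List (String × List String)) (out : List String) : Prop := out = combo_picker_alt mo dict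
instance (mo : String) (dict : List (String × List String)) (out : List String) : Decidable (Spec_combo_picker mo dict out) := by unfold Spec_combo_picker; infer_instance

-- ===== CLAIM (what is proved, stated in full; the proofs are below) =====
def Claim_equal_combo_picker : Prop := ∀ (mo : String) (dict : List (String × List String)), Dom_combo_picker mo dict → Spec_combo_picker mo dict (combo_picker mo dict)

-- ===== LEMMAS AND PROOFS =====

-- the per-position candidate pool both programs use
def pvCand (dict : List (String × List String)) (nt : Char) : List String :=
  match PySem.Dict.get? (PySem.Dict.mk dict) (String.singleton nt) with
  | some v => v
  | none => [String.singleton nt]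

lemma pvJoin_nil : PySem.Str.join "" [] = "" := by
  simp [PySem.Str.join, PySem.Chars.join, List.intercalate]

lemma pvJoin_cons (x : String) (t : List String) :
    PySem.Str.join "" (x :: t) = x ++ PySem.Str.join "" t := by
  cases t <;> simp [PySem.Str.join, PySem.Chars.join, List.intercalate]

-- A's first loop builds the list of singleton pools
lemma pvNewList_eq (dict : List (String × List String)) (cs : List Char)
    (acc : List (List (List String))) :
    cs.foldl (fun acc nt =>
      match PySem.Dict.get? (PySem.Dict.mk dict) (String.singleton nt) with
      | some v => acc ++ [[v]]
      | none => acc ++ [[[String.singleton nt]]]) acc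
    = acc ++ cs.map (fun nt => [pvCand dict nt]) := by
  induction cs generalizing acc with
  | nil => simp
  | cons c cs ih =>
    simp only [List.foldl_cons, List.map_cons, ih, pvCand]
    cases PySem.Dict.get? (PySem.Dict.mk dict) (String.singleton c) <;> simp

-- product of singleton pools is one tuple: the list of pools' contents
lemma pvProduct_singletons {α : Type} (ls : List (List α)) :
    pvProduct (ls.map (fun l => [l])) = [ls] := by
  induction ls with
  | nil => rfl
  | cons l ls ih => simp [pvProduct, ih]

-- B's fold, characterised against pvProduct of the candidate pools
lemma pvAlt_fold (dict : List (String × List String)) (cs : List Char)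
    (acc : List String) :
    cs.foldl (fun acc nt =>
      let bases :=
        match PySem.Dict.get? (PySem.Dict.mk dict) (String.singleton nt) with
        | some v => v
        | none => [String.singleton nt]
      acc.flatMap (fun p => bases.map (fun b => p ++ b))) acc
    = acc.flatMap (fun p =>
        (pvProduct (cs.map (pvCand dict))).map (fun t => p ++ PySem.Str.join "" t)) := by
  induction cs generalizing acc with
  | nil =>
    simp [pvProduct, pvJoin_nil]
  | cons c cs ih =>
    simp only [List.foldl_cons, List.map_cons, pvProduct, ih]
    show (acc.flatMap (fun p => (pvCand dict c).map (fun b => p ++ b))).flatMap _ = _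
    simp only [List.flatMap_assoc, List.flatMap_map, List.map_flatMap, List.map_map]
    refine List.flatMap_congr (fun p _ => ?_)
    refine List.flatMap_congr (fun b _ => ?_)
    simp [Function.comp, pvJoin_cons, String.append_assoc]

-- ===== VERDICT (by name: the statement is the Claim_ definition above) =====
theorem combo_picker_spec : Claim_equal_combo_picker := by
  intro mo dict _
  show combo_picker mo dict = combo_picker_alt mo dict
  simp only [combo_picker, combo_picker_alt]
  rw [pvNewList_eq, pvAlt_fold]
  rw [show (fun nt => [pvCand dict nt]) = (fun l => [l]) ∘ (pvCand dict) from rfl,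
      ← List.map_map, List.nil_append, pvProduct_singletons]
  simp [PySem.List.pyGet?, PySem.List.pyIdx?]
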